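-- pv_equiv track=rewrite | github.com/jimin9703/baekjoon | 프로그래머스/2/42626. 더 맵게/더 맵게.py | solution
-- ===== SOURCE A (Python) =====
-- import heapq
--
-- def solution(scoville, K):
--     answer = 0
--     ans = []
--     cnt = 0
--     for i in range(len(scoville)):
--         heapq.heappush(ans, scoville[i])
--
--     while len(ans) > 1:
--         min1 = heapq.heappop(ans)
--         if min1 >= K:
--             return cnt
--         min2 = heapq.heappop(ans)
--
--         new = min1+(min2*2)
--         heapq.heappush(ans, new)
--         cnt += 1
--     if ans[0] >= K:
--         return cnt
--     else:
--         return -1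
-- ===== SOURCE B (Python) =====
-- def solution(scoville, K):
--     ans = sorted(scoville)
--     cnt = 0
--     while len(ans) > 1:
--         if ans[0] >= K:
--             return cnt
--         new = ans[0] + ans[1] * 2
--         rest = ans[2:]
--         i = 0
--         while i < len(rest) and rest[i] <= new:
--             i += 1
--         rest.insert(i, new)
--         ans = rest
--         cnt += 1
--     if ans[0] >= K:
--         return cnt
--     return -1
-- ===== Notes on version B (the rewrite author's own statement) =====
-- stated objective: alternative
-- what changed: Replaces the heapq binary heap with a single upfront sort plus ordered insertion (a hand-rolled insort) into a plain sorted list, so the two minima are always the first two elements.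
import Mathlib
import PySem

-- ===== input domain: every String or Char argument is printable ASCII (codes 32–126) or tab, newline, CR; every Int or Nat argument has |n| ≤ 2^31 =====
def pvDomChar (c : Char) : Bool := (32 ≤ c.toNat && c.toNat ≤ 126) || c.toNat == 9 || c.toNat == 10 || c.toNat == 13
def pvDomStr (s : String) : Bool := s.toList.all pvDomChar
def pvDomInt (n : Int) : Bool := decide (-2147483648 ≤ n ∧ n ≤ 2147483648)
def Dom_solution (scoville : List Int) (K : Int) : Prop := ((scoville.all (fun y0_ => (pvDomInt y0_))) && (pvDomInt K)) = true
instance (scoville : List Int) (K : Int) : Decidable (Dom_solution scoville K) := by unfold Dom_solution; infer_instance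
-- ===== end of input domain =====

-- B replaces A's heapq binary heap by one upfront sort plus ordered (insort-style)
-- insertion into a plain sorted list; equivalence of the return value is proved on
-- nonempty inputs (both versions raise IndexError on []).

-- ===== PORT A =====
-- heapq on Int values is modelled exactly as a multiset: heappush appends,
-- heappop returns the minimum value and removes one occurrence of it (Int values
-- carry no identity, so which equal occurrence is removed is unobservable).
theorem min?_getD_mem {l : List Int} (d : Int) (h : l ≠ []) : l.min?.getD d ∈ l := by
  cases hm : l.min? with
  | none => exact absurd (List.min?_eq_none_iff.mp hm) h
  | some m => simpa using List.min?_mem hm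

def solLoopA (K : Int) (ans : List Int) (cnt : Int) : Int :=
  if h : 1 < ans.length then
    let m1 := ans.min?.getD 0          -- heappop: the minimum value
    if m1 ≥ K then cnt
    else
      let rest := ans.erase m1         -- … with one occurrence removed
      let m2 := rest.min?.getD 0       -- second heappop
      solLoopA K ((rest.erase m2) ++ [m1 + m2 * 2]) (cnt + 1)
  else if ans.headI ≥ K then cnt else -1  -- ans[0]; empty ans (IndexError) is outside Pre_
termination_by ans.length
decreasing_by
  have h1 : ans.min?.getD 0 ∈ ans := min?_getD_mem 0 (by intro he; simp [he] at h)
  have e1 : (ans.erase (ans.min?.getD 0)).length = ans.length - 1 := List.length_erase_of_mem h1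
  have h2 : (ans.erase (ans.min?.getD 0)).min?.getD 0 ∈ ans.erase (ans.min?.getD 0) :=
    min?_getD_mem 0 (by intro he; rw [he] at e1; simp at e1; omega)
  have e2 := List.length_erase_of_mem h2
  simp only [List.length_append, List.length_cons, List.length_nil, e2, e1]
  omega

def solution (scoville : List Int) (K : Int) : Int :=
  solLoopA K (scoville.foldl (fun ans x => ans ++ [x]) []) 0

-- ===== PORT B =====
-- the inner while loop of Source B: insert x after all elements ≤ x
def insortB (x : Int) : List Int → List Int
  | [] => [x]
  | y :: ys => if y ≤ x then y :: insortB x ys else x :: y :: ys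

theorem length_insortB (x : Int) (l : List Int) :
    (insortB x l).length = l.length + 1 := by
  induction l with
  | nil => rfl
  | cons y ys ih => simp only [insortB]; split <;> simp [ih]

def solLoopB (K : Int) (ans : List Int) (cnt : Int) : Int :=
  match ans with
  | a :: b :: rest =>
    if a ≥ K then cnt
    else solLoopB K (insortB (a + b * 2) rest) (cnt + 1)
  | _ => if ans.headI ≥ K then cnt else -1  -- ans[0]; empty ans is outside Pre_
termination_by ans.length
decreasing_by simp [length_insortB]

def solution_alt (scoville : List Int) (K : Int) : Int :=
  solLoopB K (PySem.List.sorted scoville (fun x => x) false) 0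

-- ===== PRECONDITION & SPEC =====
-- Pre_ excludes only the empty list, on which both A and B raise IndexError at ans[0].
def Pre_solution (scoville : List Int) (_K : Int) : Prop := scoville ≠ []
instance (scoville : List Int) (K : Int) : Decidable (Pre_solution scoville K) := by
  unfold Pre_solution; infer_instance
def pvWitness_solution : List Int × Int := ([1, 2, 3, 9, 10, 12], 7)
def Spec_solution (scoville : List Int) (K : Int) (out : Int) : Prop := out = solution_alt scoville K
instance (scoville : List Int) (K : Int) (out : Int) : Decidable (Spec_solution scoville K out) := by unfold Spec_solution; infer_instance

-- ===== CLAIM (what is proved, stated in full; the proofs are below) =====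
def Claim_equal_solution : Prop := ∀ (scoville : List Int) (K : Int), Dom_solution scoville K → Pre_solution scoville K → Spec_solution scoville K (solution scoville K)

-- ===== LEMMAS AND PROOFS =====

theorem min?_of_perm {l l' : List Int} (hp : l.Perm l') : l.min? = l'.min? := by
  cases h' : l'.min? with
  | none =>
    rw [List.min?_eq_none_iff] at h'
    subst h'
    rw [List.min?_eq_none_iff]
    exact List.perm_nil.mp hp
  | some a =>
    rw [List.min?_eq_some_iff] at h' ⊢
    exact ⟨hp.mem_iff.mpr h'.1, fun b hb => h'.2 b (hp.mem_iff.mp hb)⟩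

theorem min?_sorted_cons {a : Int} {t : List Int}
    (hs : (a :: t).Pairwise (· ≤ ·)) : (a :: t).min? = some a := by
  rw [List.min?_eq_some_iff]
  refine ⟨List.mem_cons_self, fun b hb => ?_⟩
  rcases List.mem_cons.mp hb with rfl | hb
  · exact le_refl _
  · exact (List.pairwise_cons.mp hs).1 b hb

theorem insortB_perm (x : Int) (l : List Int) : (insortB x l).Perm (x :: l) := by
  induction l with
  | nil => rfl
  | cons y ys ih =>
    simp only [insortB]
    split
    · exact ((ih.cons y).trans (List.Perm.swap x y ys))
    · rfl

theorem insortB_sorted {x : Int} {l : List Int}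
    (hs : l.Pairwise (· ≤ ·)) : (insortB x l).Pairwise (· ≤ ·) := by
  induction l with
  | nil => simp [insortB]
  | cons y ys ih =>
    rcases List.pairwise_cons.mp hs with ⟨hy, hys⟩
    simp only [insortB]
    split
    · rename_i hle
      refine List.pairwise_cons.mpr ⟨fun b hb => ?_, ih hys⟩
      rcases List.mem_cons.mp ((insortB_perm x ys).mem_iff.mp hb) with h | hb
      · exact h ▸ hle
      · exact hy b hb
    · rename_i hgt
      refine List.pairwise_cons.mpr ⟨fun b hb => ?_, hs⟩
      rcases List.mem_cons.mp hb with rfl | hb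
      · omega
      · exact le_of_lt (lt_of_lt_of_le (by omega) (hy b hb))

theorem loop_eq (K : Int) : ∀ n (l l' : List Int) (cnt : Int), l.length ≤ n →
    l.Perm l' → l'.Pairwise (· ≤ ·) → solLoopA K l cnt = solLoopB K l' cnt := by
  intro n
  induction n with
  | zero =>
    intro l l' cnt hn hp _
    have hl : l = [] := List.length_eq_zero_iff.mp (Nat.le_zero.mp hn)
    subst hl
    have hl' : l' = [] := List.perm_nil.mp hp.symm
    subst hl'
    rw [solLoopA, solLoopB] <;> simp
  | succ n ih =>
    intro l l' cnt hn hp hs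
    rcases l' with _ | ⟨a, _ | ⟨b, rest⟩⟩
    · have hl : l = [] := List.perm_nil.mp hp
      subst hl
      rw [solLoopA, solLoopB] <;> simp
    · have hl : l = [a] := List.perm_singleton.mp hp
      subst hl
      rw [solLoopA, solLoopB] <;> simp
    · have hlen : l.length = rest.length + 2 := by
        simpa using hp.length_eq
      have hdite : 1 < l.length := by omega
      have hmin : l.min? = some a := (min?_of_perm hp).trans (min?_sorted_cons hs)
      have hperm1 : (l.erase a).Perm (b :: rest) := by
        have := hp.erase a
        rwa [List.erase_cons_head] at this
      have hs2 : (b :: rest).Pairwise (· ≤ ·) := (List.pairwise_cons.mp hs).2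
      have hmin2 : (l.erase a).min? = some b :=
        (min?_of_perm hperm1).trans (min?_sorted_cons hs2)
      have hperm2 : ((l.erase a).erase b).Perm rest := by
        have := hperm1.erase b
        rwa [List.erase_cons_head] at this
      rw [solLoopA, solLoopB]
      rw [dif_pos hdite]
      simp only [hmin, Option.getD_some, hmin2]
      by_cases hK : a ≥ K
      · simp [hK]
      · rw [if_neg hK, if_neg hK]
        apply ih
        · have h1 : a ∈ l := List.min?_mem hmin
          have h2 : b ∈ l.erase a := List.min?_mem hmin2
          have e1 := List.length_erase_of_mem h1
          have e2 := List.length_erase_of_mem h2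
          simp only [List.length_append, List.length_cons, List.length_nil, e2, e1]
          omega
        · exact ((hperm2.append_right [a + b * 2]).trans
            (List.perm_append_singleton (a + b * 2) rest)).trans
            (insortB_perm (a + b * 2) rest).symm
        · exact insortB_sorted (List.pairwise_cons.mp hs2).2

theorem foldl_push (l acc : List Int) :
    l.foldl (fun ans x => ans ++ [x]) acc = acc ++ l := by
  induction l generalizing acc with
  | nil => simp
  | cons x xs ih => simp [List.foldl_cons, ih]

-- ===== VERDICT (by name: the statement is the Claim_ definition above) =====
theorem solution_spec : Claim_equal_solution := by
  intro scoville K _ _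
  unfold Spec_solution solution solution_alt
  rw [foldl_push, List.nil_append]
  exact loop_eq K scoville.length scoville
    (PySem.List.sorted scoville (fun x => x) false) 0 le_rfl
    (PySem.List.sorted_perm ..).symm
    (by simpa using PySem.List.sorted_pairwise scoville (fun x => x))
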